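-- pv_equiv track=rewrite | github.com/pypi-data/pypi-mirror-290 | packages/rst-fast-parse/rst_fast_parse-0.0.13-py3-none-any.whl/rst_fast_parse/_opqrstu/rrrrrrrr.py | gAAAAABmuzW5fL2xX1H6C_63X5_v2ZyyvkTy2vCJdQ0S_q8aI_drhcOVVxli1Irn1YxxslN0Ftsq7WpgxeoKlNSyfKolEcl0Nw__
-- ===== SOURCE A (Python) =====
-- from typing import NewType
--
-- EscapedStr = NewType('EscapedStr', str)
--
-- def gAAAAABmuzW5fL2xX1H6C_63X5_v2ZyyvkTy2vCJdQ0S_q8aI_drhcOVVxli1Irn1YxxslN0Ftsq7WpgxeoKlNSyfKolEcl0Nw__(text: str) -> EscapedStr: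
--     parts = []
--     start = 0
--     while True:
--         found = text.find('\\', start)
--         if found == -1:
--             parts.append(text[start:])
--             return EscapedStr(''.join(parts))
--         parts.append(text[start:found])
--         parts.append('\x00' + text[found + 1:found + 2])
--         start = found + 2
-- ===== SOURCE B (Python) =====
-- from typing import NewType
--
-- EscapedStr = NewType('EscapedStr', str)
--
-- def gAAAAABmuzW5fL2xX1H6C_63X5_v2ZyyvkTy2vCJdQ0S_q8aI_drhcOVVxli1Irn1YxxslN0Ftsq7WpgxeoKlNSyfKolEcl0Nw__(text: str) -> EscapedStr:
--     out = []
--     escaped = False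
--     for ch in text:
--         if escaped:
--             out.append('\x00' + ch)
--             escaped = False
--         elif ch == '\\':
--             escaped = True
--         else:
--             out.append(ch)
--     if escaped:
--         out.append('\x00')
--     return EscapedStr(''.join(out))
-- ===== Notes on version B (the rewrite author's own statement) =====
-- stated objective: alternative
-- what changed: Replaced the find/slice chunking loop (repeated str.find with slice bookkeeping via a start index) by a single stateful per-character scan with a boolean escaped flag that emits characters one at a time.
import Mathlib
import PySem

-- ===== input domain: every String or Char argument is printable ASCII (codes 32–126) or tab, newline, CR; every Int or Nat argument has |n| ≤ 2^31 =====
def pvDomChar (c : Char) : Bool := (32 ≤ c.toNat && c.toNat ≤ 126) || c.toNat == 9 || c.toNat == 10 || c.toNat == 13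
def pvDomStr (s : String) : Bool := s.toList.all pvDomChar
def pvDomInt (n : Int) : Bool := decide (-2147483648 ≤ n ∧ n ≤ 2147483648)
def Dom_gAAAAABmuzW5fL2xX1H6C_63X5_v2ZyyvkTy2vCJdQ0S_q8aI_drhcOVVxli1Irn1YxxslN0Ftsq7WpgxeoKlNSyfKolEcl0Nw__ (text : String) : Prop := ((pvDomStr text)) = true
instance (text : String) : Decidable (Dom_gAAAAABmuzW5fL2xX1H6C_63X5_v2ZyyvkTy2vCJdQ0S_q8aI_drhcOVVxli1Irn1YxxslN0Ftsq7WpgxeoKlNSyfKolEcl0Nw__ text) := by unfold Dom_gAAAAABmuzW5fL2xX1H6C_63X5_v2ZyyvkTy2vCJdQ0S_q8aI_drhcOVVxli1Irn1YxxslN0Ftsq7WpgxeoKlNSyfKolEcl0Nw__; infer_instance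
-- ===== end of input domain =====

-- B replaces A's find/slice chunking loop by a single per-character scan with a boolean escaped flag; same return value (alternative decomposition, no speed claim).


-- ===== PORT A =====
-- A scans with repeated text.find('\\', start) and slice bookkeeping; ported step for step.
def pvEscNul : Char := Char.ofNat 0

-- termination fact for pvALoop (cited by its decreasing_by)
theorem pvFindFrom_facts (cs : List Char) (start : Nat)
    (h : ¬ PySem.Chars.findFrom cs ['\\'] (start : Int) = -1) :
    start ≤ cs.length ∧ start ≤ (PySem.Chars.findFrom cs ['\\'] (start : Int)).toNat ∧
      (PySem.Chars.findFrom cs ['\\'] (start : Int)).toNat < cs.length := by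
  have hle : start ≤ cs.length := by
    by_contra hgt
    apply h
    simp only [PySem.Chars.findFrom]
    split_ifs with h1 h2 h3 <;> first | rfl | omega
  obtain ⟨h1, h2, _⟩ := PySem.Chars.findFrom_natCast_spec cs ['\\'] start hle h
  have h3 := h2.length_le
  simp at h3
  refine ⟨hle, by omega, by omega⟩

def pvALoop (cs : List Char) (start : Nat) (parts : List (List Char)) : List Char :=
  let found := PySem.Chars.findFrom cs ['\\'] (start : Int)
  if h : found = -1 then
    (parts ++ [PySem.List.slice cs (some (start : Int)) none]).flatten
  else
    pvALoop cs (found.toNat + 2)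
      (parts ++ [PySem.List.slice cs (some (start : Int)) (some found),
                 pvEscNul :: PySem.List.slice cs (some (found + 1)) (some (found + 2))])
termination_by cs.length + 1 - start
decreasing_by
  have := pvFindFrom_facts cs start h
  omega

def gAAAAABmuzW5fL2xX1H6C_63X5_v2ZyyvkTy2vCJdQ0S_q8aI_drhcOVVxli1Irn1YxxslN0Ftsq7WpgxeoKlNSyfKolEcl0Nw__ (text : String) : String := String.ofList (pvALoop text.toList 0 [])

-- ===== PORT B =====
-- B is a single per-character scan with a boolean `escaped` flag.
def pvBStep (st : List (List Char) × Bool) (ch : Char) : List (List Char) × Bool :=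
  if st.2 then (st.1 ++ [[pvEscNul, ch]], false)
  else if ch = '\\' then (st.1, true)
  else (st.1 ++ [[ch]], false)

def gAAAAABmuzW5fL2xX1H6C_63X5_v2ZyyvkTy2vCJdQ0S_q8aI_drhcOVVxli1Irn1YxxslN0Ftsq7WpgxeoKlNSyfKolEcl0Nw___alt (text : String) : String :=
  let st := text.toList.foldl pvBStep ([], false)
  let out := if st.2 then st.1 ++ [[pvEscNul]] else st.1
  String.ofList out.flatten

-- ===== PRECONDITION & SPEC =====
def Spec_gAAAAABmuzW5fL2xX1H6C_63X5_v2ZyyvkTy2vCJdQ0S_q8aI_drhcOVVxli1Irn1YxxslN0Ftsq7WpgxeoKlNSyfKolEcl0Nw__ (text : String) (out : String) : Prop := out = gAAAAABmuzW5fL2xX1H6C_63X5_v2ZyyvkTy2vCJdQ0S_q8aI_drhcOVVxli1Irn1YxxslN0Ftsq7WpgxeoKlNSyfKolEcl0Nw___alt text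
instance (text : String) (out : String) : Decidable (Spec_gAAAAABmuzW5fL2xX1H6C_63X5_v2ZyyvkTy2vCJdQ0S_q8aI_drhcOVVxli1Irn1YxxslN0Ftsq7WpgxeoKlNSyfKolEcl0Nw__ text out) := by unfold Spec_gAAAAABmuzW5fL2xX1H6C_63X5_v2ZyyvkTy2vCJdQ0S_q8aI_drhcOVVxli1Irn1YxxslN0Ftsq7WpgxeoKlNSyfKolEcl0Nw__; infer_instance

-- ===== CLAIM =====
def Claim_equal_gAAAAABmuzW5fL2xX1H6C_63X5_v2ZyyvkTy2vCJdQ0S_q8aI_drhcOVVxli1Irn1YxxslN0Ftsq7WpgxeoKlNSyfKolEcl0Nw__ : Prop := ∀ (text : String), Dom_gAAAAABmuzW5fL2xX1H6C_63X5_v2ZyyvkTy2vCJdQ0S_q8aI_drhcOVVxli1Irn1YxxslN0Ftsq7WpgxeoKlNSyfKolEcl0Nw__ text → Spec_gAAAAABmuzW5fL2xX1H6C_63X5_v2ZyyvkTy2vCJdQ0S_q8aI_drhcOVVxli1Irn1YxxslN0Ftsq7WpgxeoKlNSyfKolEcl0Nw__ text (gAAAAABmuzW5fL2xX1H6C_63X5_v2ZyyvkTy2vCJdQ0S_q8aI_drhcOVVxli1Irn1YxxslN0Ftsq7WpgxeoKlNSyfKolEcl0Nw__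 text)

-- ===== LEMMAS AND PROOFS =====
-- the common escape function both ports compute
def pvEscF : Bool → List Char → List Char
  | true, [] => [pvEscNul]
  | true, c :: r => pvEscNul :: c :: pvEscF false r
  | false, [] => []
  | false, c :: r => if c = '\\' then pvEscF true r else c :: pvEscF false r

theorem pvEscF_no_bs (l : List Char) (h : '\\' ∉ l) : pvEscF false l = l := by
  induction l with
  | nil => rfl
  | cons c r ih =>
    simp at h
    simp [pvEscF, ih h.2, Ne.symm h.1]

theorem pvEscF_append (p q : List Char) (h : '\\' ∉ p) :
    pvEscF false (p ++ q) = p ++ pvEscF false q := by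
  induction p with
  | nil => rfl
  | cons c r ih =>
    simp at h
    simp [pvEscF, ih h.2, Ne.symm h.1]

theorem pvEscF_true (r : List Char) :
    pvEscF true r = pvEscNul :: (r.take 1 ++ pvEscF false (r.drop 1)) := by
  cases r <;> rfl

theorem pvBInv (cs : List Char) (esc : Bool) (out : List (List Char)) :
    (let st := cs.foldl pvBStep (out, esc)
     (if st.2 then st.1 ++ [[pvEscNul]] else st.1).flatten) = out.flatten ++ pvEscF esc cs := by
  induction cs generalizing esc out with
  | nil => cases esc <;> simp [pvEscF]
  | cons c r ih =>
    cases esc with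
    | true => simp [pvBStep, ih, pvEscF]
    | false =>
      by_cases hc : c = '\\'
      · simp [pvBStep, hc, ih, pvEscF]
      · simp [pvBStep, hc, ih, pvEscF]

theorem pvALoop_eq (cs : List Char) (start : Nat) (parts : List (List Char)) :
    pvALoop cs start parts = parts.flatten ++ pvEscF false (cs.drop start) := by
  fun_induction pvALoop cs start parts with
  | case1 start parts found hfound =>
    have hdef : found = PySem.Chars.findFrom cs ['\\'] (start : Int) := rfl
    rw [hdef] at hfound
    simp only [PySem.List.slice_from_natCast]
    have hesc : pvEscF false (cs.drop start) = cs.drop start := by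
      by_cases hle : start ≤ cs.length
      · apply pvEscF_no_bs
        have := (PySem.Chars.findFrom_natCast_eq_neg_one_iff cs ['\\'] start hle).mp hfound
        rw [List.singleton_infix_iff] at this
        exact this
      · rw [List.drop_of_length_le (by omega)]
        rfl
    simp [hesc]
  | case2 start parts found hfound ih =>
    have hdef : found = PySem.Chars.findFrom cs ['\\'] (start : Int) := rfl
    rw [hdef] at hfound ih ⊢
    obtain ⟨hle, hsf, hfl⟩ := pvFindFrom_facts cs start hfound
    obtain ⟨h1, hpre, hmin⟩ := PySem.Chars.findFrom_natCast_spec cs ['\\'] start hle hfound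
    set fI := PySem.Chars.findFrom cs ['\\'] (start : Int) with hfI
    set f := fI.toNat with hf
    have hfeq : fI = (f : Int) := by omega
    rw [ih]
    -- slices
    have hs1 : PySem.List.slice cs (some (start : Int)) (some fI)
        = (cs.drop start).take (f - start) := by
      rw [hfeq, PySem.List.slice_natCast]
    have hs2 : PySem.List.slice cs (some (fI + 1)) (some (fI + 2))
        = (cs.drop (f + 1)).take 1 := by
      rw [hfeq]
      have e1 : ((f : Int) + 1) = ((f + 1 : Nat) : Int) := by push_cast; ring
      have e2 : ((f : Int) + 2) = ((f + 2 : Nat) : Int) := by push_cast; ring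
      rw [e1, e2, PySem.List.slice_natCast]
      congr 1
      omega
    -- head char at f is a backslash
    obtain ⟨t, ht⟩ := hpre
    have hdropf : cs.drop f = '\\' :: t := by simpa using ht.symm
    have hdropf1 : cs.drop (f + 1) = t := by
      have h' : cs.drop (f + 1) = (cs.drop f).drop 1 := by
        rw [List.drop_drop]
      rw [h', hdropf]
      rfl
    -- split of cs.drop start
    have hsplit : cs.drop start
        = (cs.drop start).take (f - start) ++ '\\' :: cs.drop (f + 1) := by
      conv_lhs => rw [← List.take_append_drop (f - start) (cs.drop start)]
      congr 1
      rw [List.drop_drop]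
      have h' : start + (f - start) = f := by omega
      rw [h', hdropf, hdropf1]
    -- no backslash in the skipped chunk
    have hnb : '\\' ∉ (cs.drop start).take (f - start) := by
      intro hmem
      obtain ⟨i, hi, hget⟩ := List.mem_iff_getElem.mp hmem
      have hml : i < f - start ∧ i < (cs.drop start).length := by
        simpa [List.length_take, lt_min_iff] using hi
      have hilen : i < f - start := hml.1
      have hidx : i < (cs.drop start).length := hml.2
      have hcs : cs[start + i]'(by simp at hidx; omega) = '\\' := by
        have h' : ((cs.drop start).take (f - start))[i]'hi = (cs.drop start)[i]'hidx := by
          simp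
        rw [h'] at hget
        rw [List.getElem_drop] at hget
        exact hget
      apply hmin (start + i) (by omega) (by omega)
      have h' : cs.drop (start + i) = '\\' :: cs.drop (start + i + 1) := by
        rw [List.drop_eq_getElem_cons (by simp at hidx; omega)]
        rw [hcs]
      rw [h']
      exact ⟨_, rfl⟩
    -- assemble
    conv_rhs => rw [hsplit]
    rw [pvEscF_append _ _ hnb]
    simp only [pvEscF, pvEscF_true]
    rw [hs1, hs2, hdropf1]
    have hdropf2 : cs.drop (f + 2) = t.drop 1 := by
      have h' : cs.drop (f + 2) = (cs.drop (f + 1)).drop 1 := by rw [List.drop_drop]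
      rw [h', hdropf1]
    rw [hdropf2]
    simp [List.flatten_append, List.append_assoc]

-- ===== VERDICT =====
theorem gAAAAABmuzW5fL2xX1H6C_63X5_v2ZyyvkTy2vCJdQ0S_q8aI_drhcOVVxli1Irn1YxxslN0Ftsq7WpgxeoKlNSyfKolEcl0Nw___spec : Claim_equal_gAAAAABmuzW5fL2xX1H6C_63X5_v2ZyyvkTy2vCJdQ0S_q8aI_drhcOVVxli1Irn1YxxslN0Ftsq7WpgxeoKlNSyfKolEcl0Nw__ := by
  intro text _
  unfold Spec_gAAAAABmuzW5fL2xX1H6C_63X5_v2ZyyvkTy2vCJdQ0S_q8aI_drhcOVVxli1Irn1YxxslN0Ftsq7WpgxeoKlNSyfKolEcl0Nw__ gAAAAABmuzW5fL2xX1H6C_63X5_v2ZyyvkTy2vCJdQ0S_q8aI_drhcOVVxli1Irn1YxxslN0Ftsq7WpgxeoKlNSyfKolEcl0Nw__ gAAAAABmuzW5fL2xX1H6C_63X5_v2ZyyvkTy2vCJdQ0S_q8aI_drhcOVVxli1Irn1YxxslN0Ftsq7WpgxeoKlNSyfKolEcl0Nw___alt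
  rw [pvALoop_eq]
  have := pvBInv text.toList false []
  simp only at this
  simp [this]
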